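-- pv_equiv track=rewrite | github.com/jadeja-mohitrajsinh/DMS | backend/app/services/graph_service.py | _incidence_matrix
-- ===== SOURCE A (Python) =====
-- from typing import List, Dict, Any, Optional, Tuple
--
-- def _incidence_matrix(nodes: List[str], edges: List[Tuple[str, str]]) -> List[List[int]]:
--     index = {n: i for i, n in enumerate(nodes)}
--     matrix = [[0 for _ in range(len(edges))] for _ in range(len(nodes))]
--     for e_idx, (u, v) in enumerate(edges):
--         if u in index:
--             matrix[index[u]][e_idx] = 1
--         if v in index:
--             matrix[index[v]][e_idx] = 1
--     return matrix
-- ===== SOURCE B (Python) =====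
-- from typing import List, Tuple
--
-- def _incidence_matrix(nodes: List[str], edges: List[Tuple[str, str]]) -> List[List[int]]:
--     index = {n: i for i, n in enumerate(nodes)}
--     return [[1 if (index.get(u) == i or index.get(v) == i) else 0 for (u, v) in edges]
--             for i, _ in enumerate(nodes)]
-- ===== Notes on version B (the rewrite author's own statement) =====
-- stated objective: idiomatic
-- what changed: A preallocates a zero matrix and scatters 1s into it edge-by-edge; B builds the node index once and then gathers each row directly as a comprehension over the edges (row-major gather instead of scatter), comparing index.get(endpoint) to the row number so duplicate node names behave exactly as in A.
import Mathlib
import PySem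

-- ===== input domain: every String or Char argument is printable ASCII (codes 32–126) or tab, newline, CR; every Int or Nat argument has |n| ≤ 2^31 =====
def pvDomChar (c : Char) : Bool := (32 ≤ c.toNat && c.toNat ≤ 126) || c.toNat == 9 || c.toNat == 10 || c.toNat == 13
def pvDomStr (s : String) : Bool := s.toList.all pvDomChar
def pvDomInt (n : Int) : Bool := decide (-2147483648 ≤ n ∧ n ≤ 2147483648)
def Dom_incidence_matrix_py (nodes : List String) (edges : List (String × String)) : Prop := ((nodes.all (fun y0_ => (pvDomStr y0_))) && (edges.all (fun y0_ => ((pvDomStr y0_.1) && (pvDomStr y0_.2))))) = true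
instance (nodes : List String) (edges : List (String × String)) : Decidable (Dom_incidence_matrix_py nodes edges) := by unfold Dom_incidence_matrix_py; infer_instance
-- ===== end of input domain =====

-- B builds the node→position index once and gathers each row directly over the edges
-- (row-major gather) instead of A's preallocate-then-scatter over edges; same cost, more direct.

-- shared helper: index = {n: i for i, n in enumerate(nodes)}  (identical line in both Pythons)
def pvIndexOf (nodes : List String) : PySem.Dict String Int :=
  (PySem.List.enumerate nodes).foldl (fun d p => d.insert p.2 p.1) PySem.Dict.empty

-- ===== PORT A =====
-- loop body: if u in index: matrix[index[u]][e_idx] = 1; if v in index: matrix[index[v]][e_idx] = 1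
def pvScatter (d : PySem.Dict String Int) (m : List (List Int)) (p : Int × (String × String)) : List (List Int) :=
  let m1 := match d.get? p.2.1 with
    | some i => m.modify i.toNat (fun row => row.set p.1.toNat 1)
    | none => m
  match d.get? p.2.2 with
    | some i => m1.modify i.toNat (fun row => row.set p.1.toNat 1)
    | none => m1

def incidence_matrix_py (nodes : List String) (edges : List (String × String)) : List (List Int) :=
  (PySem.List.enumerate edges).foldl (pvScatter (pvIndexOf nodes))
    (List.replicate nodes.length (List.replicate edges.length (0 : Int)))

-- ===== PORT B =====
def incidence_matrix_py_alt (nodes : List String) (edges : List (String × String)) : List (List Int) :=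
  let index := pvIndexOf nodes
  (PySem.List.enumerate nodes).map (fun p =>
    edges.map (fun e =>
      if index.get? e.1 = some p.1 ∨ index.get? e.2 = some p.1 then (1 : Int) else 0))

-- ===== PRECONDITION & SPEC =====
def Spec_incidence_matrix_py (nodes : List String) (edges : List (String × String)) (out : List (List Int)) : Prop := out = incidence_matrix_py_alt nodes edges
instance (nodes : List String) (edges : List (String × String)) (out : List (List Int)) : Decidable (Spec_incidence_matrix_py nodes edges out) := by unfold Spec_incidence_matrix_py; infer_instance

-- ===== CLAIM (what is proved, stated in full; the proofs are below) =====
def Claim_equal_incidence_matrix_py : Prop := ∀ (nodes : List String) (edges : List (String × String)), Dom_incidence_matrix_py nodes edges → Spec_incidence_matrix_py nodes edges (incidence_matrix_py nodes edges)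

-- ===== LEMMAS AND PROOFS =====

-- "row i is hit by edge e": some endpoint of e maps (as a row index) to i
def pvHitB (d : PySem.Dict String Int) (i : Nat) (e : String × String) : Bool :=
  ((d.get? e.1).any (fun iv => iv.toNat == i)) || ((d.get? e.2).any (fun iv => iv.toNat == i))

lemma modset_get (m : List (List Int)) (a b i j : Nat) :
    ((m.modify a (fun r => r.set b (1:Int)))[i]?.bind (fun r => r[j]?)) =
    (m[i]?.bind (fun r => r[j]?)).map (fun x => if i = a ∧ j = b then 1 else x) := by
  rw [List.getElem?_modify]
  cases h : m[i]? with
  | none => simp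
  | some r =>
    simp only [Option.map_eq_map, Option.map_some, Option.bind_some]
    by_cases hia : a = i
    · subst hia
      rw [if_pos rfl]
      cases hr : r[j]? with
      | none =>
        have hlen : r.length ≤ j := List.getElem?_eq_none_iff.mp hr
        rw [List.getElem?_set, hr]
        have hnb : ¬ b < r.length ∨ ¬ b = j := by omega
        rcases hnb with hnb | hnb
        · split_ifs <;> simp
        · rw [if_neg hnb]; simp
      | some x =>
        have hlt : j < r.length := (List.getElem?_eq_some_iff.mp hr).1
        rw [List.getElem?_set]
        by_cases hb : b = j
        · subst hb; simp [hlt, hr]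
        · rw [if_neg hb, hr]
          simp only [Option.map_some, Option.some.injEq, true_and]
          rw [if_neg (fun h : j = b => hb h.symm)]
    · rw [if_neg hia]
      have hne : ¬ (i = a ∧ j = b) := fun hc => hia hc.1.symm
      simp [hne]

lemma pvScatter_get (d : PySem.Dict String Int) (m : List (List Int))
    (p : Int × (String × String)) (i j : Nat) :
    ((pvScatter d m p)[i]?.bind (fun r => r[j]?)) =
    (m[i]?.bind (fun r => r[j]?)).map (fun x => if j = p.1.toNat ∧ pvHitB d i p.2 then 1 else x) := by
  unfold pvScatter pvHitB
  cases hu : d.get? p.2.1 with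
  | none =>
    cases hv : d.get? p.2.2 with
    | none =>
      simp only [hu, hv, Option.any_none, Bool.or_self, Bool.false_eq_true, and_false, if_false]
      cases m[i]?.bind (fun r => r[j]?) <;> simp
    | some iv =>
      rw [modset_get]
      cases m[i]?.bind (fun r => r[j]?) <;> simp [hu, hv]
      split_ifs <;> omega
  | some iu =>
    cases hv : d.get? p.2.2 with
    | none =>
      rw [modset_get]
      cases m[i]?.bind (fun r => r[j]?) <;> simp [hu, hv]
      split_ifs <;> omega
    | some iv =>
      rw [modset_get, modset_get, Option.map_map]
      cases m[i]?.bind (fun r => r[j]?) with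
      | none => simp
      | some x =>
        simp only [Option.map_some, Option.some.injEq, Function.comp]
        by_cases h1 : i = iu.toNat ∧ j = p.1.toNat <;>
        by_cases h2 : i = iv.toNat ∧ j = p.1.toNat <;>
          simp [h1, h2, hu, hv] <;> tauto

lemma fold_get (d : PySem.Dict String Int) (es : List (String × String)) (s : Nat)
    (m : List (List Int)) (i j : Nat) :
    (((PySem.List.enumerate es (s:Int)).foldl (pvScatter d) m)[i]?.bind (fun r => r[j]?)) =
    (m[i]?.bind (fun r => r[j]?)).map
      (fun x => if s ≤ j ∧ (es[j - s]?.any (pvHitB d i)) = true then 1 else x) := by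
  induction es generalizing s m with
  | nil =>
    simp only [PySem.List.enumerate_nil, List.foldl_nil, List.getElem?_nil, Option.any_none,
      Bool.false_eq_true, and_false, if_false]
    cases m[i]?.bind (fun r => r[j]?) <;> simp
  | cons e es ih =>
    rw [PySem.List.enumerate_cons, List.foldl_cons]
    have hc : (s : Int) + 1 = ((s + 1 : Nat) : Int) := by push_cast; ring
    rw [hc, ih, pvScatter_get]
    rw [Option.map_map]
    cases m[i]?.bind (fun r => r[j]?) with
    | none => simp
    | some x =>
      simp only [Option.map_some, Option.some.injEq, Function.comp, Int.toNat_natCast]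
      rcases lt_trichotomy j s with hlt | heq | hgt
      · have h1 : ¬ (s ≤ j) := by omega
        have h2 : ¬ (s + 1 ≤ j) := by omega
        have h3 : ¬ (j = s) := by omega
        simp [h1, h2, h3]
      · subst heq
        have h2 : ¬ (j + 1 ≤ j) := by omega
        simp [h2, Nat.sub_self]
      · have h1 : s ≤ j := by omega
        have h2 : s + 1 ≤ j := by omega
        have h3 : ¬ (j = s) := by omega
        have h4 : j - s = (j - (s + 1)) + 1 := by omega
        rw [h4]
        simp [h1, h2, h3, List.getElem?_cons_succ]

lemma pvScatter_length (d : PySem.Dict String Int) (m : List (List Int))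
    (p : Int × (String × String)) : (pvScatter d m p).length = m.length := by
  unfold pvScatter
  cases d.get? p.2.1 <;> cases d.get? p.2.2 <;> simp [List.length_modify]

lemma fold_length (d : PySem.Dict String Int) (es : List (String × String)) (s : Int)
    (m : List (List Int)) :
    ((PySem.List.enumerate es s).foldl (pvScatter d) m).length = m.length := by
  induction es generalizing s m with
  | nil => simp [PySem.List.enumerate_nil]
  | cons e es ih =>
    rw [PySem.List.enumerate_cons, List.foldl_cons, ih, pvScatter_length]

lemma indexOf_aux_nonneg (l : List String) (s : Int) (d : PySem.Dict String Int)
    (hs : 0 ≤ s) (hd : ∀ u iv, d.get? u = some iv → 0 ≤ iv) :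
    ∀ u iv, ((PySem.List.enumerate l s).foldl (fun d p => d.insert p.2 p.1) d).get? u = some iv →
      0 ≤ iv := by
  induction l generalizing s d with
  | nil => simpa [PySem.List.enumerate_nil] using hd
  | cons x l ih =>
    rw [PySem.List.enumerate_cons, List.foldl_cons]
    refine ih (s + 1) _ (by omega) ?_
    intro u iv h
    rw [PySem.Dict.get?_insert] at h
    by_cases hx : u = x
    · simp [hx] at h; omega
    · simp [hx] at h; exact hd u iv h

lemma indexOf_nonneg (nodes : List String) (u : String) (iv : Int)
    (h : (pvIndexOf nodes).get? u = some iv) : 0 ≤ iv := by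
  exact indexOf_aux_nonneg nodes 0 PySem.Dict.empty le_rfl
    (fun u iv h => by rw [PySem.Dict.get?_empty] at h; exact absurd h (by simp)) u iv h

lemma hitB_iff (nodes : List String) (i : Nat) (e : String × String) :
    pvHitB (pvIndexOf nodes) i e = true ↔
    ((pvIndexOf nodes).get? e.1 = some (i : Int) ∨ (pvIndexOf nodes).get? e.2 = some (i : Int)) := by
  unfold pvHitB
  rw [Bool.or_eq_true]
  apply or_congr <;>
  · cases h : (pvIndexOf nodes).get? _ with
    | none => simp
    | some iv =>
      have := indexOf_nonneg nodes _ iv h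
      simp only [Option.any_some, beq_iff_eq, Option.some.injEq]
      omega

-- ===== VERDICT (by name: the statement is the Claim_ definition above) =====
theorem incidence_matrix_py_spec : Claim_equal_incidence_matrix_py := by
  intro nodes edges _
  unfold Spec_incidence_matrix_py incidence_matrix_py incidence_matrix_py_alt
  apply List.ext_getElem?
  intro i
  rw [List.getElem?_map, PySem.List.getElem?_enumerate]
  by_cases hi : i < nodes.length
  · -- both sides are rows; compare them entrywise
    have hlen : ((PySem.List.enumerate edges).foldl (pvScatter (pvIndexOf nodes))
        (List.replicate nodes.length (List.replicate edges.length (0:Int)))).length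
        = nodes.length := by
      rw [show (PySem.List.enumerate edges) = PySem.List.enumerate edges ((0:Nat):Int) from rfl]
      rw [fold_length]; simp
    obtain ⟨ra, hra⟩ : ∃ ra, ((PySem.List.enumerate edges).foldl (pvScatter (pvIndexOf nodes))
        (List.replicate nodes.length (List.replicate edges.length (0:Int))))[i]? = some ra :=
      ⟨_, List.getElem?_eq_getElem (by omega)⟩
    rw [hra, List.getElem?_eq_getElem hi]
    simp only [Option.map_some, Option.some.injEq]
    apply List.ext_getElem?
    intro j
    have hkey := fold_get (pvIndexOf nodes) edges 0
      (List.replicate nodes.length (List.replicate edges.length (0:Int))) i j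
    rw [show ((0:Nat):Int) = (0:Int) from rfl] at hkey
    rw [hra, Option.bind_some] at hkey
    rw [hkey, List.getElem?_map, List.getElem?_replicate, if_pos hi, Option.bind_some,
      List.getElem?_replicate, Nat.sub_zero]
    cases he : edges[j]? with
    | none =>
      have hj : edges.length ≤ j := List.getElem?_eq_none_iff.mp he
      rw [if_neg (by omega : ¬ j < edges.length)]
      simp
    | some e =>
      have hj : j < edges.length := (List.getElem?_eq_some_iff.mp he).1
      rw [if_pos hj]
      simp only [he, Option.any_some, Option.map_some, Nat.zero_le, true_and,
        Option.some.injEq]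
      rw [show ((0:Int) + (i:Int)) = (i:Int) by ring]
      by_cases hh : pvHitB (pvIndexOf nodes) i e = true
      · rw [if_pos hh, if_pos ((hitB_iff nodes i e).mp hh)]
      · rw [if_neg hh, if_neg (fun hc => hh ((hitB_iff nodes i e).mpr hc))]
  · -- out of range on both sides
    have h1 : nodes[i]? = none := List.getElem?_eq_none_iff.mpr (by omega)
    rw [h1]
    apply List.getElem?_eq_none_iff.mpr
    rw [show (PySem.List.enumerate edges) = PySem.List.enumerate edges ((0:Nat):Int) from rfl]
    rw [fold_length]
    simp; omega
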